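-- pv_equiv track=rewrite | github.com/Hunterdii/GeeksforGeeks-POTD | July 2025 GFG SOLUTION/July-14.py | cuts
-- ===== SOURCE A (Python) =====
-- def cuts(s):
--     if s[0] == '0': return -1
--     n = len(s)
--     powers = set()
--     p = 1
--     while p <= 10**9:
--         powers.add(p)
--         p *= 5
--     dp = [n + 1] * (n + 1)
--     dp[n] = 0
--     for i in range(n - 1, -1, -1):
--         if s[i] == '0': continue
--         num = 0
--         for j in range(i, n):
--             num = (num << 1) + int(s[j])
--             if num > 10**9: break
--             if num in powers and dp[j + 1] <= n:
--                 dp[i] = min(dp[i], 1 + dp[j + 1])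
--     return -1 if dp[0] > n else dp[0]
-- ===== SOURCE B (Python) =====
-- _POWERS = frozenset(5 ** k for k in range(13))   # all powers of 5 up to 10**9
--
--
-- def _succs(s, n, i):
--     # end positions of pieces starting at i whose numeric value is a power of 5
--     out = []
--     num = 0
--     for j in range(i, n):
--         num = num * 2 + int(s[j])
--         if num > 10 ** 9:
--             break
--         if num in _POWERS:
--             out.append(j + 1)
--     return out
--
--
-- def cuts(s):
--     # BFS shortest path on positions 0..n: an edge i -> m is a valid piece s[i:m]
--     if s[0] == '0':
--         return -1
--     n = len(s)
--     seen = [False] * (n + 1)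
--     seen[0] = True
--     frontier = [0]
--     level = 0
--     while frontier:
--         level += 1
--         nxt = []
--         for i in frontier:
--             if s[i] == '0':
--                 continue
--             for m in _succs(s, n, i):
--                 if not seen[m]:
--                     if m == n:
--                         return level
--                     seen[m] = True
--                     nxt.append(m)
--         frontier = nxt
--     return -1
-- ===== Notes on version B (the rewrite author's own statement) =====
-- stated objective: alternative
-- what changed: Replaced A's backward minimum-DP over a dp array (sentinel n+1 entries, dp[i]=min(dp[i],1+dp[j+1])) by a forward breadth-first search on string positions: an explicit successor function per position, a frontier/seen level-by-level expansion, and an early return at the level that first reaches n.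
import Mathlib
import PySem

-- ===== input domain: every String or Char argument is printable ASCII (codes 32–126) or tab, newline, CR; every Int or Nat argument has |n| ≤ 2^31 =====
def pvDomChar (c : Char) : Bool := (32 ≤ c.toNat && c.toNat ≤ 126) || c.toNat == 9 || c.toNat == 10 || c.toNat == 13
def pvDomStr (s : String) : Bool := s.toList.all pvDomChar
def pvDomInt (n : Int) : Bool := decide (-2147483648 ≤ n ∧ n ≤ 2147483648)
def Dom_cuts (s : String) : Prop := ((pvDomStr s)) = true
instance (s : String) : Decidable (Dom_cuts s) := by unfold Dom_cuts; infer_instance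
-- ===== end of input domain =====

-- B replaces A's backward min-DP over a dp array by a forward breadth-first search on positions
-- (frontier/seen, level counting, early return on reaching n) with an explicit successor function
-- (objective: alternative).


-- ===== PORT A =====
-- int(s[j]) for a digit character (exact on '0'..'9'; Pre_ keeps non-digits out of reach)
def digitVal (c : Char) : Int := (c.toNat : Int) - 48

-- while p <= 10**9: powers.add(p); p *= 5   (fuel bounds the loop: p grows each round, so 10**9 + 1 rounds suffice)
def pvPowLoop : ℕ → Int → PySem.Set Int → PySem.Set Int
  | 0, _, acc => acc
  | fuel + 1, p, acc => if p ≤ 1000000000 then pvPowLoop fuel (p * 5) (PySem.Set.add acc p) else acc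

-- for j in range(i, n): num = (num << 1) + int(s[j]); if num > 10**9: break; if num in powers and dp[j+1] <= n: dp[i] = min(dp[i], 1 + dp[j+1])
def pvInnerA (cs : List Char) (n : Int) (pows : PySem.Set Int) (i : Int) :
    ℕ → List Int → Int → Int → List Int
  | 0, dp, _, _ => dp
  | fuel + 1, dp, j, num =>
    if j < n then
      let num2 := num * 2 + digitVal ((PySem.List.pyGet? cs j).getD ' ')
      if num2 > 1000000000 then dp
      else
        let dp2 := if pows.contains num2 ∧ PySem.List.pyGetD dp (j + 1) 0 ≤ n then
            PySem.List.pySetD dp i (min (PySem.List.pyGetD dp i 0) (1 + PySem.List.pyGetD dp (j + 1) 0))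
          else dp
        pvInnerA cs n pows i fuel dp2 (j + 1) num2
    else dp

def cuts (s : String) : Int :=
  if (PySem.Str.pyGet? s 0).getD ' ' = '0' then -1
  else
    let cs := s.toList
    let n : Int := cs.length
    let pows := pvPowLoop 1000000001 1 PySem.Set.empty
    let dp0 := PySem.List.pySetD (List.replicate (n.toNat + 1) (n + 1)) n 0
    let dp := (PySem.List.pyRange (n - 1) (-1) (-1)).foldl
      (fun dp i =>
        if (PySem.List.pyGet? cs i).getD ' ' = '0' then dp
        else pvInnerA cs n pows i (n - i).toNat dp i 0) dp0
    if PySem.List.pyGetD dp 0 0 > n then -1 else PySem.List.pyGetD dp 0 0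

-- ===== PORT B =====
-- _POWERS = frozenset(5 ** k for k in range(13))   (the 13 powers of 5 up to 10**9, as literals)
def pvPowersB : List Int :=
  [1, 5, 25, 125, 625, 3125, 15625, 78125, 390625, 1953125, 9765625, 48828125, 244140625]

-- _succs: for j in range(i, n): num = num*2 + int(s[j]); if num > 10**9: break; if num in _POWERS: out.append(j+1)
def pvSuccsJ (cs : List Char) (n : Int) : ℕ → Int → Int → List Int
  | 0, _, _ => []
  | fuel + 1, j, num =>
    if j < n then
      let num2 := num * 2 + digitVal ((PySem.List.pyGet? cs j).getD ' ')
      if num2 > 1000000000 then []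
      else (if pvPowersB.contains num2 then [j + 1] else []) ++ pvSuccsJ cs n fuel (j + 1) num2
    else []

-- for m in _succs(s, n, i): if not seen[m]: if m == n: return level; seen[m] = True; nxt.append(m)
-- (.inl () = the 'return level' fired)
def pvMark (n : Int) : List Int → List Bool → List Int → Sum Unit (List Bool × List Int)
  | [], seen, nxt => .inr (seen, nxt)
  | m :: rest, seen, nxt =>
    if PySem.List.pyGetD seen m false then pvMark n rest seen nxt
    else if m = n then .inl ()
    else pvMark n rest (PySem.List.pySetD seen m true) (nxt ++ [m])

-- for i in frontier: if s[i] == '0': continue; <mark the successors of i>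
def pvLevel (cs : List Char) (n : Int) : List Int → List Bool → List Int → Sum Unit (List Bool × List Int)
  | [], seen, nxt => .inr (seen, nxt)
  | i :: rest, seen, nxt =>
    if (PySem.List.pyGet? cs i).getD ' ' = '0' then pvLevel cs n rest seen nxt
    else
      match pvMark n (pvSuccsJ cs n (n - i).toNat i 0) seen nxt with
      | .inl () => .inl ()
      | .inr (seen2, nxt2) => pvLevel cs n rest seen2 nxt2

-- while frontier: level += 1; …  (fuel bounds the loop: a node of distance k satisfies k ≤ n, so n+1 rounds suffice)
def pvBFS (cs : List Char) (n : Int) : ℕ → List Int → List Bool → Int → Int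
  | 0, _, _, _ => -1
  | fuel + 1, frontier, seen, level =>
    if frontier = [] then -1
    else
      match pvLevel cs n frontier seen [] with
      | .inl () => level + 1
      | .inr (seen2, nxt) => pvBFS cs n fuel nxt seen2 (level + 1)

def cuts_alt (s : String) : Int :=
  if (PySem.Str.pyGet? s 0).getD ' ' = '0' then -1
  else
    let cs := s.toList
    let n : Int := cs.length
    let seen0 := PySem.List.pySetD (List.replicate (n.toNat + 1) false) 0 true
    pvBFS cs n (n.toNat + 1) [0] seen0 0

-- ===== PRECONDITION & SPEC =====
-- Pre_ excludes exactly the inputs where A raises: the empty string (IndexError on s[0]) and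
-- strings that reach int(s[j]) on a non-digit character (ValueError).
def Pre_cuts (s : String) : Prop :=
  s.toList ≠ [] ∧ (s.toList.head? = some '0' ∨ s.toList.all Char.isDigit = true)
instance (s : String) : Decidable (Pre_cuts s) := by unfold Pre_cuts; infer_instance

def pvWitness_cuts : String := "1101"

def Spec_cuts (s : String) (out : Int) : Prop := out = cuts_alt s
instance (s : String) (out : Int) : Decidable (Spec_cuts s out) := by unfold Spec_cuts; infer_instance

-- ===== CLAIM (what is proved, stated in full; the proofs are below) =====
def Claim_equal_cuts : Prop := ∀ (s : String), Dom_cuts s → Pre_cuts s → Spec_cuts s (cuts s)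

-- ===== LEMMAS AND PROOFS =====

-- ---------- spec-side definitions ----------

-- digit at position k (default ' ' out of range)
def pvD (cs : List Char) (k : ℕ) : Int := digitVal (cs.getD k ' ')

-- numeric value of the length-L substring of cs starting at i, read as a base-2 digit string
def pvVal (cs : List Char) (i : ℕ) : ℕ → Int
  | 0 => 0
  | L + 1 => 2 * pvVal cs i L + pvD cs (i + L)

-- s[i:j] is a piece both programs accept: nonempty, in range, not starting with '0', value a power of 5
def pvValid (cs : List Char) (i j : ℕ) : Prop :=
  i < j ∧ j ≤ cs.length ∧ cs.getD i ' ' ≠ '0' ∧ pvVal cs i (j - i) ∈ pvPowersB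

inductive pvChain (cs : List Char) : ℕ → ℕ → ℕ → Prop
  | nil (j : ℕ) : pvChain cs 0 j j
  | cons {k i m j : ℕ} : pvValid cs i m → pvChain cs k m j → pvChain cs (k + 1) i j

def pvIsMin (cs : List Char) (i j k : ℕ) : Prop :=
  pvChain cs k i j ∧ ∀ k' < k, ¬ pvChain cs k' i j

def pvDig (cs : List Char) : Prop := ∀ k < cs.length, 0 ≤ pvD cs k

def pvCharA (cs : List Char) (dp : List Int) (i : ℕ) : Prop :=
  (dp.getD i 0 = (cs.length : Int) + 1 ∧ ∀ k, ¬ pvChain cs k i cs.length) ∨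
  (∃ k : ℕ, dp.getD i 0 = (k : Int) ∧ pvIsMin cs i cs.length k)

def pvCondA (cs : List Char) (dp : List Int) (i j' : ℕ) : Prop :=
  pvVal cs i (j' + 1 - i) ∈ pvPowersB ∧ dp.getD (j' + 1) 0 ≤ (cs.length : Int)

def pvInvA (cs : List Char) (dp : List Int) (t : ℕ) : Prop :=
  dp.length = cs.length + 1 ∧ (∀ m, t ≤ m → m ≤ cs.length → pvCharA cs dp m) ∧
  (∀ m < t, dp.getD m 0 = (cs.length : Int) + 1)

-- B-side spec abstractions
def pvSeenOk (cs : List Char) (seen : List Bool) (k : ℕ) : Prop :=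
  seen.length = cs.length + 1 ∧ seen.getD cs.length false = false ∧
  (∀ m < cs.length, (seen.getD m false = true ↔ ∃ k' ≤ k, pvChain cs k' 0 m))

def pvInvBFS (cs : List Char) (frontier : List Int) (seen : List Bool) (k : ℕ) : Prop :=
  pvSeenOk cs seen k ∧
  (∀ x ∈ frontier, ∃ m : ℕ, x = (m : Int) ∧ m < cs.length ∧ pvIsMin cs 0 m k) ∧
  (∀ m : ℕ, m < cs.length → pvIsMin cs 0 m k → (m : Int) ∈ frontier) ∧
  (∀ k' ≤ k, ¬ pvChain cs k' 0 cs.length)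

-- ---------- generic list lemmas ----------

theorem pvGetD_set_ne {α : Type} {l : List α} {i m : ℕ} {x d : α} (h : i ≠ m) :
    (l.set i x).getD m d = l.getD m d := by
  simp [List.getD, List.getElem?_set, h]

theorem pvGetD_set_self {α : Type} {l : List α} {i : ℕ} {x d : α} (h : i < l.length) :
    (l.set i x).getD i d = x := by
  simp [List.getD, List.getElem?_set, h]

theorem pvSet_getD_self {α : Type} {l : List α} {i : ℕ} {d : α} (h : i < l.length) :
    l.set i (l.getD i d) = l := by
  simp [List.getD, List.getElem?_eq_getElem h, List.set_getElem_self]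

-- ---------- powers of 5 ----------

theorem pvPowLoop_eq : pvPowLoop 1000000001 1 PySem.Set.empty = pvPowersB := by decide

theorem pvPowersB_le {x : Int} (hx : x ∈ pvPowersB) : x ≤ 244140625 := by
  fin_cases hx <;> norm_num

theorem pvContains_iff (l : List Int) (x : Int) : l.contains x = true ↔ x ∈ l := by
  constructor <;> intro h <;> simpa using h

-- ---------- pvVal lemmas ----------

theorem pvVal_nonneg {cs : List Char} (hd : pvDig cs) (i : ℕ) :
    ∀ L, i + L ≤ cs.length → 0 ≤ pvVal cs i L := by
  intro L
  induction L with
  | zero => intro _; simp [pvVal]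
  | succ L ih =>
    intro h
    have h1 : 0 ≤ pvVal cs i L := ih (by omega)
    have h2 : 0 ≤ pvD cs (i + L) := hd _ (by omega)
    simp only [pvVal]; omega

theorem pvVal_mono {cs : List Char} (hd : pvDig cs) (i : ℕ) :
    ∀ {L1 L2 : ℕ}, L1 ≤ L2 → i + L2 ≤ cs.length → pvVal cs i L1 ≤ pvVal cs i L2 := by
  intro L1 L2 h hle
  induction L2 with
  | zero => interval_cases L1; simp
  | succ L ih =>
    rcases Nat.lt_or_ge L1 (L + 1) with h1 | h1
    · have := ih (by omega) (by omega)
      have h2 : 0 ≤ pvVal cs i L := pvVal_nonneg hd i L (by omega)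
      have h3 : 0 ≤ pvD cs (i + L) := hd _ (by omega)
      calc pvVal cs i L1 ≤ pvVal cs i L := this
        _ ≤ 2 * pvVal cs i L + pvD cs (i + L) := by omega
        _ = pvVal cs i (L + 1) := rfl
    · have : L1 = L + 1 := by omega
      subst this; rfl

-- ---------- chain lemmas ----------

theorem pvChain_le {cs : List Char} {k i j : ℕ} (h : pvChain cs k i j) : i + k ≤ j := by
  induction h with
  | nil => omega
  | cons hv _ ih => have := hv.1; omega

theorem pvChain_zero {cs : List Char} {i j : ℕ} (h : pvChain cs 0 i j) : i = j := by
  cases h; rfl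

theorem pvChain_succ_iff {cs : List Char} {k i j : ℕ} :
    pvChain cs (k + 1) i j ↔ ∃ m, pvValid cs i m ∧ pvChain cs k m j := by
  constructor
  · intro h; cases h with
    | cons hv hc => exact ⟨_, hv, hc⟩
  · rintro ⟨m, hv, hc⟩; exact pvChain.cons hv hc

theorem pvChain_snoc_iff {cs : List Char} {k i j : ℕ} :
    pvChain cs (k + 1) i j ↔ ∃ m, pvChain cs k i m ∧ pvValid cs m j := by
  constructor
  · intro h
    induction k generalizing i with
    | zero =>
      cases h with
      | cons hv hc => exact ⟨i, by cases hc; exact pvChain.nil i, by cases hc; exact hv⟩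
    | succ k ih =>
      cases h with
      | cons hv hc =>
        obtain ⟨m', hc', hv'⟩ := ih hc
        exact ⟨m', pvChain.cons hv hc', hv'⟩
  · rintro ⟨m, hc, hv⟩
    induction k generalizing i with
    | zero => cases hc; exact pvChain.cons hv (pvChain.nil _)
    | succ k ih =>
      cases hc with
      | cons hv0 hc0 => exact pvChain.cons hv0 (ih hc0)

theorem pvChain_split {cs : List Char} {K i j : ℕ} (h : pvChain cs K i j) :
    ∀ k ≤ K, ∃ m, pvChain cs k i m ∧ pvChain cs (K - k) m j := by
  induction h with
  | nil j => intro k hk; interval_cases k; exact ⟨j, pvChain.nil j, pvChain.nil j⟩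
  | @cons k0 i0 m0 j0 hv hc ih =>
    intro k hk
    cases k with
    | zero => exact ⟨i0, pvChain.nil i0, by simpa using pvChain.cons hv hc⟩
    | succ k =>
      obtain ⟨m, h1, h2⟩ := ih k (by omega)
      exact ⟨m, pvChain.cons hv h1, by simpa [Nat.succ_sub_succ] using h2⟩

theorem pvChain_append {cs : List Char} {a b i m j : ℕ}
    (h1 : pvChain cs a i m) (h2 : pvChain cs b m j) : pvChain cs (a + b) i j := by
  induction h1 with
  | nil => simpa using h2
  | @cons k0 i0 m0 j0 hv hc ih =>
    have := pvChain.cons hv (ih h2)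
    simpa [Nat.add_right_comm] using this

theorem pvExists_min {cs : List Char} {i j : ℕ} :
    ∀ K, pvChain cs K i j → ∃ D, pvIsMin cs i j D := by
  intro K
  induction K using Nat.strong_induction_on with
  | _ K ih =>
    intro h
    by_cases hsm : ∃ K' < K, pvChain cs K' i j
    · obtain ⟨K', h1, h2⟩ := hsm
      exact ih K' h1 h2
    · push_neg at hsm
      exact ⟨K, h, hsm⟩

theorem pvIsMin_unique {cs : List Char} {i j k k' : ℕ}
    (h : pvIsMin cs i j k) (h' : pvIsMin cs i j k') : k = k' := by
  rcases Nat.lt_trichotomy k k' with h1 | h1 | h1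
  · exact absurd h.1 (h'.2 k h1)
  · exact h1
  · exact absurd h'.1 (h.2 k' h1)

-- ---------- A-side proofs ----------

theorem pvInnerA_spec (cs : List Char) (hd : pvDig cs) (i : ℕ) :
    ∀ (L j : ℕ) (dp : List Int), cs.length - j = L → i ≤ j → j ≤ cs.length → dp.length = cs.length + 1 →
    ∃ x : Int,
      pvInnerA cs (cs.length : Int) (pvPowLoop 1000000001 1 PySem.Set.empty) (i : Int) L dp (j : Int) (pvVal cs i (j - i)) = dp.set i x ∧
      x ≤ dp.getD i 0 ∧
      (∀ j', j ≤ j' → j' < cs.length → pvCondA cs dp i j' → x ≤ 1 + dp.getD (j' + 1) 0) ∧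
      (x = dp.getD i 0 ∨ ∃ j', j ≤ j' ∧ j' < cs.length ∧ pvCondA cs dp i j' ∧ x = 1 + dp.getD (j' + 1) 0) := by
  intro L
  induction L with
  | zero =>
    intro j dp hL hij hjn hlen
    have hj : j = cs.length := by omega
    refine ⟨dp.getD i 0, ?_, le_refl _, ?_, Or.inl rfl⟩
    · rw [pvSet_getD_self (show i < dp.length by omega)]
      rfl
    · intro j' h1 h2; omega
  | succ L ih =>
    intro j dp hL hij hjn hlen
    have hjlt : j < cs.length := by omega
    have hnum2 : pvVal cs i (j - i) * 2 + digitVal ((PySem.List.pyGet? cs (j : Int)).getD ' ') =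
        pvVal cs i (j + 1 - i) := by
      have h1 : PySem.List.pyGet? cs (j : Int) = some cs[j] := by
        simp [PySem.List.pyGet?_natCast, List.getElem?_eq_getElem hjlt]
      have h2 : j + 1 - i = (j - i) + 1 := by omega
      rw [h1, h2]
      show pvVal cs i (j - i) * 2 + digitVal cs[j] = 2 * pvVal cs i (j - i) + pvD cs (i + (j - i))
      have h3 : i + (j - i) = j := by omega
      rw [h3]
      have h4 : pvD cs j = digitVal cs[j] := by simp [pvD, List.getD, List.getElem?_eq_getElem hjlt]
      omega
    rw [pvInnerA, if_pos (by push_cast; omega : (j : Int) < (cs.length : Int))]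
    simp only [hnum2]
    by_cases hbig : pvVal cs i (j + 1 - i) > 1000000000
    · rw [if_pos hbig]
      refine ⟨dp.getD i 0, (pvSet_getD_self (show i < dp.length by omega)).symm, le_refl _, ?_, Or.inl rfl⟩
      · intro j' h1 h2 hc
        exfalso
        have hmem := hc.1
        have h3 : pvVal cs i (j' + 1 - i) ≤ 244140625 := pvPowersB_le hmem
        have h4 : pvVal cs i (j + 1 - i) ≤ pvVal cs i (j' + 1 - i) := by
          have := pvVal_mono hd i (L1 := j + 1 - i) (L2 := j' + 1 - i) (by omega) (by omega)
          exact this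
        omega
    · rw [if_neg hbig]
      have hcontains : (pvPowLoop 1000000001 1 PySem.Set.empty).contains (pvVal cs i (j + 1 - i)) ↔
          pvVal cs i (j + 1 - i) ∈ pvPowersB := by
        rw [pvPowLoop_eq]; constructor <;> intro h <;> simpa using h
      have hgd : PySem.List.pyGetD dp ((j : Int) + 1) 0 = dp.getD (j + 1) 0 := by
        have : ((j : Int) + 1) = ((j + 1 : ℕ) : Int) := by push_cast; ring
        rw [this, PySem.List.pyGetD_natCast]
      -- the recursion argument cast: (↑j + 1) = ↑(j+1)
      have hcast : ((j : Int) + 1) = ((j + 1 : ℕ) : Int) := by push_cast; ring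
      by_cases hcond : (pvPowLoop 1000000001 1 PySem.Set.empty).contains (pvVal cs i (j + 1 - i)) ∧
          PySem.List.pyGetD dp ((j : Int) + 1) 0 ≤ (cs.length : Int)
      · rw [if_pos hcond]
        set m0 := min (PySem.List.pyGetD dp (i : Int) 0) (1 + PySem.List.pyGetD dp ((j : Int) + 1) 0) with hm0
        have hm0' : m0 = min (dp.getD i 0) (1 + dp.getD (j + 1) 0) := by
          rw [hm0, hgd, PySem.List.pyGetD_natCast]
        have hset : PySem.List.pySetD dp (i : Int) m0 = dp.set i m0 := by
          simp [PySem.List.pySetD_natCast]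
        rw [hset, hcast]
        obtain ⟨x, hx, hxle, hlb, hat⟩ := ih (j + 1) (dp.set i m0) (by omega) (by omega) (by omega)
          (by simp [hlen])
        have hgd2 : ∀ m, j < m → (dp.set i m0).getD m 0 = dp.getD m 0 := by
          intro m hm; exact pvGetD_set_ne (by omega)
        have hcondeq : ∀ j', j < j' → (pvCondA cs (dp.set i m0) i j' ↔ pvCondA cs dp i j') := by
          intro j' hj'
          unfold pvCondA
          rw [hgd2 (j' + 1) (by omega)]
        refine ⟨x, ?_, ?_, ?_, ?_⟩
        · rw [hx, List.set_set]
        · rw [pvGetD_set_self (show i < dp.length by omega)] at hxle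
          have h6 : m0 ≤ dp.getD i 0 := by rw [hm0']; exact min_le_left _ _
          omega
        · intro j' h1 h2 hc
          rcases Nat.eq_or_lt_of_le h1 with h3 | h3
          · rw [pvGetD_set_self (show i < dp.length by omega)] at hxle
            have h6 : m0 ≤ 1 + dp.getD (j + 1) 0 := by rw [hm0']; exact min_le_right _ _
            rw [← h3]; omega
          · have := hlb j' (by omega) h2 ((hcondeq j' h3).mpr hc)
            rwa [hgd2 (j' + 1) (by omega)] at this
        · rcases hat with hat | ⟨j', h1, h2, hc, hval⟩
          · rw [pvGetD_set_self (show i < dp.length by omega), hm0'] at hat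
            rcases min_cases (dp.getD i 0) (1 + dp.getD (j + 1) 0) with ⟨hmin, _⟩ | ⟨hmin, _⟩
            · exact Or.inl (by rw [hat, hmin])
            · refine Or.inr ⟨j, le_refl _, hjlt, ⟨hcontains.mp hcond.1, ?_⟩, by rw [hat, hmin]⟩
              rw [← hgd]; exact hcond.2
          · refine Or.inr ⟨j', by omega, h2, (hcondeq j' (by omega)).mp hc, ?_⟩
            rw [hval, hgd2 (j' + 1) (by omega)]
      · rw [if_neg hcond, hcast]
        obtain ⟨x, hx, hxle, hlb, hat⟩ := ih (j + 1) dp (by omega) (by omega) (by omega) hlen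
        refine ⟨x, hx, hxle, ?_, ?_⟩
        · intro j' h1 h2 hc
          rcases Nat.eq_or_lt_of_le h1 with h3 | h3
          · exfalso; subst h3
            exact hcond ⟨hcontains.mpr hc.1, by rw [hgd]; exact hc.2⟩
          · exact hlb j' (by omega) h2 hc
        · rcases hat with hat | ⟨j', h1, h2, hc, hval⟩
          · exact Or.inl hat
          · exact Or.inr ⟨j', by omega, h2, hc, hval⟩

theorem pvCharA_set_ne (cs : List Char) (dp : List Int) {t m : ℕ} (x : Int) (h : t ≠ m) :
    pvCharA cs (dp.set t x) m ↔ pvCharA cs dp m := by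
  unfold pvCharA; rw [pvGetD_set_ne h]

theorem pvMinToCharA (cs : List Char) (dp : List Int) (t : ℕ) (x : Int)
    (ht : t < cs.length) (hlen : dp.length = cs.length + 1)
    (h0 : cs.getD t ' ' ≠ '0')
    (hch : ∀ m, t + 1 ≤ m → m ≤ cs.length → pvCharA cs dp m)
    (hbase : dp.getD t 0 = (cs.length : Int) + 1)
    (hxle : x ≤ dp.getD t 0)
    (hlb : ∀ j', t ≤ j' → j' < cs.length → pvCondA cs dp t j' → x ≤ 1 + dp.getD (j' + 1) 0)
    (hat : x = dp.getD t 0 ∨ ∃ j', t ≤ j' ∧ j' < cs.length ∧ pvCondA cs dp t j' ∧ x = 1 + dp.getD (j' + 1) 0) :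
    pvCharA cs (dp.set t x) t := by
  have hsetx : (dp.set t x).getD t 0 = x := pvGetD_set_self (by omega)
  have F1 : ∀ m, t < m → m ≤ cs.length →
      (dp.getD m 0 ≤ (cs.length : Int) ↔ ∃ k : ℕ, dp.getD m 0 = (k : Int) ∧ pvIsMin cs m cs.length k) := by
    intro m h1 h2
    constructor
    · intro hle
      rcases hch m (by omega) h2 with ⟨heq, _⟩ | h
      · rw [heq] at hle; omega
      · exact h
    · rintro ⟨k, hk, hmin⟩
      have hb := pvChain_le hmin.1
      rw [hk]
      exact_mod_cast by omega
  have F2 : ∀ k, pvChain cs (k + 1) t cs.length →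
      ∃ (m : ℕ) (k_m : ℕ), t < m ∧ m ≤ cs.length ∧ pvValid cs t m ∧
        dp.getD m 0 = (k_m : Int) ∧ pvIsMin cs m cs.length k_m ∧ k_m ≤ k := by
    intro k hchain
    obtain ⟨m, hv, hc⟩ := pvChain_succ_iff.mp hchain
    have h1 : t < m := hv.1
    have h2 : m ≤ cs.length := hv.2.1
    rcases hch m (by omega) h2 with ⟨_, hno⟩ | ⟨k_m, heq, hmin⟩
    · exact absurd hc (hno k)
    · refine ⟨m, k_m, h1, h2, hv, heq, hmin, ?_⟩
      by_contra hgt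
      exact hmin.2 k (by omega) hc
  have FcondA : ∀ (m : ℕ) (k_m : ℕ), t < m → m ≤ cs.length → pvValid cs t m →
      dp.getD m 0 = (k_m : Int) → pvIsMin cs m cs.length k_m → pvCondA cs dp t (m - 1) := by
    intro m k_m h1 h2 hv heq hmin
    have hm1 : m - 1 + 1 = m := by omega
    constructor
    · rw [hm1]; exact hv.2.2.2
    · rw [hm1, heq]
      have := pvChain_le hmin.1
      exact_mod_cast by omega
  by_cases hcand : ∃ j', t ≤ j' ∧ j' < cs.length ∧ pvCondA cs dp t j'
  · obtain ⟨j0, hj01, hj02, hc0⟩ := hcand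
    obtain ⟨k0, heq0, hmin0⟩ := (F1 (j0 + 1) (by omega) (by omega)).mp hc0.2
    have hb0 := pvChain_le hmin0.1
    have hxle0 : x ≤ 1 + dp.getD (j0 + 1) 0 := hlb j0 hj01 hj02 hc0
    have hxlen : x ≤ (cs.length : Int) := by rw [heq0] at hxle0; push_cast at hxle0 ⊢; omega
    rcases hat with hat | ⟨j1, h1, h2, hc1, hveq⟩
    · rw [hbase] at hat; omega
    · obtain ⟨k1, heq1, hmin1⟩ := (F1 (j1 + 1) (by omega) (by omega)).mp hc1.2
      refine Or.inr ⟨k1 + 1, ?_, ?_, ?_⟩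
      · rw [hsetx, hveq, heq1]; push_cast; ring
      · refine pvChain.cons ?_ hmin1.1
        exact ⟨by omega, by omega, h0, hc1.1⟩
      · intro k'' hlt hchain
        cases k'' with
        | zero => have := pvChain_zero hchain; omega
        | succ k3 =>
          obtain ⟨m, k_m, hm1, hm2, hv, heqm, hminm, hkm⟩ := F2 k3 hchain
          have hcA := FcondA m k_m hm1 hm2 hv heqm hminm
          have := hlb (m - 1) (by omega) (by omega) hcA
          rw [(by omega : m - 1 + 1 = m), heqm] at this
          rw [hveq, heq1] at *
          push_cast at this hveq ⊢
          omega
  · rcases hat with hat | ⟨j', h1, h2, hc1, _⟩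
    · refine Or.inl ⟨by rw [hsetx, hat, hbase], ?_⟩
      intro k hchain
      cases k with
      | zero => have := pvChain_zero hchain; omega
      | succ k3 =>
        obtain ⟨m, k_m, hm1, hm2, hv, heqm, hminm, hkm⟩ := F2 k3 hchain
        exact hcand ⟨m - 1, by omega, by omega, FcondA m k_m hm1 hm2 hv heqm hminm⟩
    · exact absurd ⟨j', h1, h2, hc1⟩ hcand

theorem pvStepA (cs : List Char) (hd : pvDig cs) (dp : List Int) (t : ℕ)
    (ht : t < cs.length) (hInv : pvInvA cs dp (t + 1)) :
    pvInvA cs (if (PySem.List.pyGet? cs (t : Int)).getD ' ' = '0' then dp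
      else pvInnerA cs (cs.length : Int) (pvPowLoop 1000000001 1 PySem.Set.empty) (t : Int)
        (((cs.length : Int) - (t : Int)).toNat) dp (t : Int) 0) t := by
  obtain ⟨hlen, hch, hun⟩ := hInv
  have hget : (PySem.List.pyGet? cs (t : Int)).getD ' ' = cs.getD t ' ' := by
    simp [PySem.List.pyGet?_natCast, List.getElem?_eq_getElem ht, List.getD]
  by_cases h0 : cs.getD t ' ' = '0'
  · rw [if_pos (by rw [hget]; exact h0)]
    refine ⟨hlen, ?_, fun m hm => hun m (by omega)⟩
    intro m hm1 hm2
    rcases Nat.eq_or_lt_of_le hm1 with h | h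
    · refine Or.inl ⟨?_, ?_⟩
      · rw [← h]; exact hun t (by omega)
      · intro k hchain
        rw [← h] at hchain
        cases k with
        | zero => have := pvChain_zero hchain; omega
        | succ k3 =>
          obtain ⟨m', hv, _⟩ := pvChain_succ_iff.mp hchain
          exact hv.2.2.1 h0
    · exact hch m (by omega) hm2
  · rw [if_neg (by rw [hget]; exact h0)]
    have h00 : (0 : Int) = pvVal cs t (t - t) := by
      rw [Nat.sub_self]; rfl
    rw [h00]
    have hfuel : ((cs.length : Int) - (t : Int)).toNat = cs.length - t := by omega
    rw [hfuel]
    obtain ⟨x, hx, hxle, hlb, hat⟩ :=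
      pvInnerA_spec cs hd t (cs.length - t) t dp rfl (le_refl t) (by omega) hlen
    rw [hx]
    refine ⟨by simp [hlen], ?_, ?_⟩
    · intro m hm1 hm2
      rcases Nat.eq_or_lt_of_le hm1 with h | h
      · rw [← h]
        exact pvMinToCharA cs dp t x ht hlen h0 (fun m' a b => hch m' a b)
          (hun t (by omega)) hxle hlb hat
      · rw [pvCharA_set_ne cs dp x (by omega)]
        exact hch m (by omega) hm2
    · intro m hm
      rw [pvGetD_set_ne (by omega)]
      exact hun m (by omega)

theorem pvFoldA (cs : List Char) (hd : pvDig cs) :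
    ∀ (N : ℕ) (a : Int) (dp : List Int), a < (cs.length : Int) → (a + 1).toNat = N →
      pvInvA cs dp N →
      pvInvA cs ((PySem.List.pyRange a (-1) (-1)).foldl
        (fun dp i => if (PySem.List.pyGet? cs i).getD ' ' = '0' then dp
          else pvInnerA cs (cs.length : Int) (pvPowLoop 1000000001 1 PySem.Set.empty) i
            (((cs.length : Int) - i).toNat) dp i 0) dp) 0 := by
  intro N
  induction N with
  | zero =>
    intro a dp ha hN hInv
    rw [PySem.List.pyRange_neg_one_eq_nil (by omega)]
    exact hInv
  | succ N ih =>
    intro a dp ha hN hInv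
    have ha0 : 0 ≤ a := by omega
    have hat : a = ((a.toNat : ℕ) : Int) := by omega
    rw [PySem.List.pyRange_neg_one_cons (by omega : (-1:Int) < a), List.foldl_cons]
    have hstep := pvStepA cs hd dp a.toNat (by omega) (by rwa [(by omega : a.toNat + 1 = N + 1 - 1 + 1), (by omega : N + 1 - 1 + 1 = N + 1)])
    rw [← hat] at hstep
    rw [(by omega : a.toNat = N)] at hstep
    exact ih (a - 1) _ (by omega) (by omega) hstep

-- ---------- B-side proofs ----------

theorem pvSuccsJ_spec (cs : List Char) (hd : pvDig cs) (i : ℕ) :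
    ∀ (L j : ℕ), cs.length - j = L → i ≤ j → j ≤ cs.length →
    ∀ x : Int, x ∈ pvSuccsJ cs (cs.length : Int) L (j : Int) (pvVal cs i (j - i)) ↔
      ∃ m : ℕ, x = (m : Int) ∧ j < m ∧ m ≤ cs.length ∧ pvVal cs i (m - i) ∈ pvPowersB := by
  intro L
  induction L with
  | zero =>
    intro j hL hij hjn x
    have hj : j = cs.length := by omega
    simp only [pvSuccsJ, List.not_mem_nil, false_iff]
    rintro ⟨m, _, h1, h2, _⟩
    omega
  | succ L ih =>
    intro j hL hij hjn x
    have hjlt : j < cs.length := by omega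
    have hnum2 : pvVal cs i (j - i) * 2 + digitVal ((PySem.List.pyGet? cs (j : Int)).getD ' ') =
        pvVal cs i (j + 1 - i) := by
      have h1 : PySem.List.pyGet? cs (j : Int) = some cs[j] := by
        simp [PySem.List.pyGet?_natCast, List.getElem?_eq_getElem hjlt]
      have h2 : j + 1 - i = (j - i) + 1 := by omega
      rw [h1, h2]
      show pvVal cs i (j - i) * 2 + digitVal cs[j] = 2 * pvVal cs i (j - i) + pvD cs (i + (j - i))
      have h3 : i + (j - i) = j := by omega
      rw [h3]
      have h4 : pvD cs j = digitVal cs[j] := by simp [pvD, List.getD, List.getElem?_eq_getElem hjlt]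
      omega
    rw [pvSuccsJ, if_pos (by push_cast; omega : (j : Int) < (cs.length : Int))]
    simp only [hnum2]
    by_cases hbig : pvVal cs i (j + 1 - i) > 1000000000
    · rw [if_pos hbig]
      simp only [List.not_mem_nil, false_iff]
      rintro ⟨m, _, h1, h2, hmem⟩
      have h3 : pvVal cs i (m - i) ≤ 244140625 := pvPowersB_le hmem
      have h4 : pvVal cs i (j + 1 - i) ≤ pvVal cs i (m - i) :=
        pvVal_mono hd i (by omega) (by omega)
      omega
    · rw [if_neg hbig]
      have hcast : ((j : Int) + 1) = ((j + 1 : ℕ) : Int) := by push_cast; ring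
      rw [hcast]
      have hrec := ih (j + 1) (by omega) (by omega) (by omega) x
      rw [List.mem_append, hrec]
      constructor
      · rintro (hx | ⟨m, h1, h2, h3, h4⟩)
        · have hc : pvPowersB.contains (pvVal cs i (j + 1 - i)) = true := by
            by_contra hc
            rw [if_neg hc] at hx
            exact List.not_mem_nil hx
          rw [if_pos hc, List.mem_singleton] at hx
          exact ⟨j + 1, hx, by omega, by omega, (pvContains_iff _ _).mp hc⟩
        · exact ⟨m, h1, by omega, h3, h4⟩
      · rintro ⟨m, h1, h2, h3, h4⟩
        rcases Nat.eq_or_lt_of_le h2 with h5 | h5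
        · left
          rw [if_pos ((pvContains_iff _ _).mpr (by rw [← h5] at h4; exact h4))]
          rw [List.mem_singleton, h1, ← h5]
        · exact Or.inr ⟨m, h1, by omega, h3, h4⟩

-- the edge relation seen from position i (a frontier node with s[i] ≠ '0')
theorem pvMark_spec (cs : List Char) (L : List Int) :
    ∀ (seen : List Bool) (nxt : List Int),
      seen.length = cs.length + 1 → seen.getD cs.length false = false →
      (∀ x ∈ L, ∃ m : ℕ, x = (m : Int) ∧ m ≤ cs.length) →
      (pvMark (cs.length : Int) L seen nxt = .inl () ↔ ((cs.length : ℕ) : Int) ∈ L) ∧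
      (∀ seen2 nxt2, pvMark (cs.length : Int) L seen nxt = .inr (seen2, nxt2) →
        seen2.length = cs.length + 1 ∧ seen2.getD cs.length false = false ∧
        (∀ m : ℕ, m < cs.length → (seen2.getD m false = true ↔ seen.getD m false = true ∨ (m : Int) ∈ L)) ∧
        (∀ y, y ∈ nxt2 ↔ y ∈ nxt ∨ ∃ m : ℕ, y = (m : Int) ∧ m < cs.length ∧
          seen.getD m false = false ∧ (m : Int) ∈ L)) := by
  induction L with
  | nil =>
    intro seen nxt hlen hn _
    refine ⟨by simp [pvMark], ?_⟩
    intro seen2 nxt2 h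
    simp only [pvMark, Sum.inr.injEq, Prod.mk.injEq] at h
    obtain ⟨h1, h2⟩ := h
    subst h1; subst h2
    refine ⟨hlen, hn, fun m _ => by simp, fun y => by simp⟩
  | cons m0 rest ih =>
    intro seen nxt hlen hn hel
    obtain ⟨mm, hm0, hmmle⟩ := hel m0 (List.mem_cons_self)
    subst hm0
    have hgd : PySem.List.pyGetD seen ((mm : ℕ) : Int) false = seen.getD mm false :=
      PySem.List.pyGetD_natCast _ _ _
    have hel' : ∀ x ∈ rest, ∃ m : ℕ, x = (m : Int) ∧ m ≤ cs.length :=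
      fun x hx => hel x (List.mem_cons_of_mem _ hx)
    by_cases hseen : seen.getD mm false = true
    · have hmmne : mm ≠ cs.length := fun h => by rw [h, hn] at hseen; exact Bool.false_ne_true hseen
      rw [pvMark, if_pos (by rw [hgd]; exact hseen)]
      obtain ⟨iha, ihb⟩ := ih seen nxt hlen hn hel'
      refine ⟨?_, ?_⟩
      · rw [iha, List.mem_cons]
        constructor
        · exact Or.inr
        · rintro (h | h)
          · exact absurd (by exact_mod_cast h.symm) hmmne
          · exact h
      · intro seen2 nxt2 h
        obtain ⟨h1, h2, h3, h4⟩ := ihb seen2 nxt2 h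
        refine ⟨h1, h2, ?_, ?_⟩
        · intro m hm
          rw [h3 m hm, List.mem_cons]
          constructor
          · rintro (h | h)
            · exact Or.inl h
            · exact Or.inr (Or.inr h)
          · rintro (h | h | h)
            · exact Or.inl h
            · have : m = mm := by exact_mod_cast h
              exact Or.inl (by rw [this]; exact hseen)
            · exact Or.inr h
        · intro y
          rw [h4 y]
          constructor
          · rintro (h | ⟨m, ha, hb, hc, hd'⟩)
            · exact Or.inl h
            · exact Or.inr ⟨m, ha, hb, hc, List.mem_cons_of_mem _ hd'⟩
          · rintro (h | ⟨m, ha, hb, hc, hd'⟩)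
            · exact Or.inl h
            · rcases List.mem_cons.mp hd' with h' | h'
              · have : m = mm := by exact_mod_cast h'
                rw [this, hseen] at hc
                exact absurd hc (by simp)
              · exact Or.inr ⟨m, ha, hb, hc, h'⟩
    · have hseen' : seen.getD mm false = false := by
        cases h : seen.getD mm false
        · rfl
        · exact absurd h hseen
      rw [pvMark, if_neg (by rw [hgd, hseen']; simp)]
      by_cases hmn : mm = cs.length
      · rw [if_pos (by rw [hmn])]
        refine ⟨?_, ?_⟩
        · simp only [true_iff]
          rw [hmn]
          exact List.mem_cons_self
        · intro seen2 nxt2 h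
          exact absurd h (by simp)
      · rw [if_neg (by exact fun h => hmn (by exact_mod_cast h))]
        have hmmlt : mm < cs.length := by omega
        have hset : PySem.List.pySetD seen ((mm : ℕ) : Int) true = seen.set mm true :=
          PySem.List.pySetD_natCast _ _ _
        rw [hset]
        have hlen' : (seen.set mm true).length = cs.length + 1 := by simp [hlen]
        have hn' : (seen.set mm true).getD cs.length false = false := by
          rw [pvGetD_set_ne hmn]; exact hn
        obtain ⟨iha, ihb⟩ := ih (seen.set mm true) (nxt ++ [((mm : ℕ) : Int)]) hlen' hn' hel'
        refine ⟨?_, ?_⟩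
        · rw [iha, List.mem_cons]
          constructor
          · exact Or.inr
          · rintro (h | h)
            · exact absurd (by exact_mod_cast h.symm) hmn
            · exact h
        · intro seen2 nxt2 h
          obtain ⟨h1, h2, h3, h4⟩ := ihb seen2 nxt2 h
          refine ⟨h1, h2, ?_, ?_⟩
          · intro m hm
            rw [h3 m hm, List.mem_cons]
            by_cases hmmm : m = mm
            · subst hmmm
              rw [pvGetD_set_self (by omega)]
              simp
            · rw [pvGetD_set_ne (fun h => hmmm h.symm)]
              constructor
              · rintro (h | h)
                · exact Or.inl h
                · exact Or.inr (Or.inr h)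
              · rintro (h | h | h)
                · exact Or.inl h
                · exact absurd (by exact_mod_cast h) hmmm
                · exact Or.inr h
          · intro y
            rw [h4 y, List.mem_append, List.mem_singleton]
            constructor
            · rintro ((h | h) | ⟨m, ha, hb, hc, hd'⟩)
              · exact Or.inl h
              · exact Or.inr ⟨mm, h, hmmlt, hseen', List.mem_cons_self⟩
              · by_cases hmmm : m = mm
                · subst hmmm
                  rw [pvGetD_set_self (by omega)] at hc
                  exact absurd hc (by simp)
                · rw [pvGetD_set_ne (fun h => hmmm h.symm)] at hc
                  exact Or.inr ⟨m, ha, hb, hc, List.mem_cons_of_mem _ hd'⟩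
            · rintro (h | ⟨m, ha, hb, hc, hd'⟩)
              · exact Or.inl (Or.inl h)
              · by_cases hmmm : m = mm
                · subst hmmm
                  exact Or.inl (Or.inr ha)
                · rcases List.mem_cons.mp hd' with h' | h'
                  · exact absurd (by exact_mod_cast h') hmmm
                  · refine Or.inr ⟨m, ha, hb, ?_, h'⟩
                    rw [pvGetD_set_ne (fun h => hmmm h.symm)]
                    exact hc

theorem pvLevel_spec (cs : List Char) (hd : pvDig cs) (F : List Int) :
    ∀ (seen : List Bool) (nxt : List Int),
      seen.length = cs.length + 1 → seen.getD cs.length false = false →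
      (∀ x ∈ F, ∃ i : ℕ, x = (i : Int) ∧ i < cs.length) →
      (pvLevel cs (cs.length : Int) F seen nxt = .inl () ↔
        ∃ i : ℕ, (i : Int) ∈ F ∧ pvValid cs i cs.length) ∧
      (∀ seen2 nxt2, pvLevel cs (cs.length : Int) F seen nxt = .inr (seen2, nxt2) →
        seen2.length = cs.length + 1 ∧ seen2.getD cs.length false = false ∧
        (∀ m : ℕ, m < cs.length → (seen2.getD m false = true ↔ seen.getD m false = true ∨
          ∃ i : ℕ, (i : Int) ∈ F ∧ pvValid cs i m)) ∧
        (∀ y, y ∈ nxt2 ↔ y ∈ nxt ∨ ∃ m : ℕ, y = (m : Int) ∧ m < cs.length ∧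
          seen.getD m false = false ∧ ∃ i : ℕ, (i : Int) ∈ F ∧ pvValid cs i m)) := by
  induction F with
  | nil =>
    intro seen nxt hlen hn _
    refine ⟨by simp [pvLevel], ?_⟩
    intro seen2 nxt2 h
    simp only [pvLevel, Sum.inr.injEq, Prod.mk.injEq] at h
    obtain ⟨h1, h2⟩ := h
    subst h1; subst h2
    exact ⟨hlen, hn, fun m _ => by simp, fun y => by simp⟩
  | cons i0 rest ih =>
    intro seen nxt hlen hn hel
    obtain ⟨ii, hi0, hiilt⟩ := hel i0 (List.mem_cons_self)
    subst hi0
    have hel' : ∀ x ∈ rest, ∃ i : ℕ, x = (i : Int) ∧ i < cs.length :=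
      fun x hx => hel x (List.mem_cons_of_mem _ hx)
    have hget : (PySem.List.pyGet? cs ((ii : ℕ) : Int)).getD ' ' = cs.getD ii ' ' := by
      simp [PySem.List.pyGet?_natCast, List.getElem?_eq_getElem hiilt, List.getD]
    have hhead : ∀ (i : ℕ) (P : ℕ → Prop), ((i : Int) ∈ (((ii : ℕ) : Int) :: rest) ∧ P i) ↔
        ((i = ii ∧ P i) ∨ ((i : Int) ∈ rest ∧ P i)) := by
      intro i P
      rw [List.mem_cons]
      constructor
      · rintro ⟨h1 | h1, h2⟩
        · exact Or.inl ⟨by exact_mod_cast h1, h2⟩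
        · exact Or.inr ⟨h1, h2⟩
      · rintro (⟨h1, h2⟩ | ⟨h1, h2⟩)
        · exact ⟨Or.inl (by exact_mod_cast h1), h2⟩
        · exact ⟨Or.inr h1, h2⟩
    by_cases h0 : cs.getD ii ' ' = '0'
    · rw [pvLevel, if_pos (by rw [hget]; exact h0)]
      obtain ⟨iha, ihb⟩ := ih seen nxt hlen hn hel'
      have hnov : ∀ m : ℕ, ¬ pvValid cs ii m := fun m hv => hv.2.2.1 h0
      refine ⟨?_, ?_⟩
      · rw [iha]
        constructor
        · rintro ⟨i, h1, h2⟩; exact ⟨i, List.mem_cons_of_mem _ h1, h2⟩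
        · rintro ⟨i, h1, h2⟩
          rcases (hhead i (fun i => pvValid cs i cs.length)).mp ⟨h1, h2⟩ with ⟨he, hv⟩ | ⟨h1', h2'⟩
          · exact absurd h2 (by rw [he]; exact hnov _)
          · exact ⟨i, h1', h2'⟩
      · intro seen2 nxt2 h
        obtain ⟨h1, h2, h3, h4⟩ := ihb seen2 nxt2 h
        refine ⟨h1, h2, ?_, ?_⟩
        · intro m hm
          rw [h3 m hm]
          constructor
          · rintro (h | ⟨i, ha, hb⟩)
            · exact Or.inl h
            · exact Or.inr ⟨i, List.mem_cons_of_mem _ ha, hb⟩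
          · rintro (h | ⟨i, ha, hb⟩)
            · exact Or.inl h
            · rcases (hhead i (fun i => pvValid cs i m)).mp ⟨ha, hb⟩ with ⟨he, hv⟩ | ⟨ha', hb'⟩
              · exact absurd hb (by rw [he]; exact hnov _)
              · exact Or.inr ⟨i, ha', hb'⟩
        · intro y
          rw [h4 y]
          constructor
          · rintro (h | ⟨m, ha, hb, hc, i, hd', he⟩)
            · exact Or.inl h
            · exact Or.inr ⟨m, ha, hb, hc, i, List.mem_cons_of_mem _ hd', he⟩
          · rintro (h | ⟨m, ha, hb, hc, i, hd', he⟩)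
            · exact Or.inl h
            · rcases (hhead i (fun i => pvValid cs i m)).mp ⟨hd', he⟩ with ⟨hf, hv⟩ | ⟨hd'', he'⟩
              · exact absurd he (by rw [hf]; exact hnov _)
              · exact Or.inr ⟨m, ha, hb, hc, i, hd'', he'⟩
    · rw [pvLevel, if_neg (by rw [hget]; exact h0)]
      -- the successor list of ii and its characterisation
      have hfuel : (((cs.length : ℕ) : Int) - ((ii : ℕ) : Int)).toNat = cs.length - ii := by omega
      have h00 : (0 : Int) = pvVal cs ii (ii - ii) := by rw [Nat.sub_self]; rfl
      have hsuccs := pvSuccsJ_spec cs hd ii (cs.length - ii) ii rfl (le_refl _) (by omega)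
      rw [hfuel, h00]
      set succs := pvSuccsJ cs ((cs.length : ℕ) : Int) (cs.length - ii) ((ii : ℕ) : Int)
        (pvVal cs ii (ii - ii)) with hsdef
      have hsmem : ∀ x : Int, x ∈ succs ↔ ∃ m : ℕ, x = (m : Int) ∧ pvValid cs ii m := by
        intro x
        rw [hsuccs x]
        constructor
        · rintro ⟨m, ha, hb, hc, hd'⟩
          exact ⟨m, ha, hb, hc, h0, hd'⟩
        · rintro ⟨m, ha, ⟨hb, hc, _, hd'⟩⟩
          exact ⟨m, ha, hb, hc, hd'⟩
      have hsel : ∀ x ∈ succs, ∃ m : ℕ, x = (m : Int) ∧ m ≤ cs.length := by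
        intro x hx
        obtain ⟨m, ha, hv⟩ := (hsmem x).mp hx
        exact ⟨m, ha, hv.2.1⟩
      obtain ⟨hma, hmb⟩ := pvMark_spec cs succs seen nxt hlen hn hsel
      have hnin : ((cs.length : ℕ) : Int) ∈ succs ↔ pvValid cs ii cs.length := by
        rw [hsmem]
        constructor
        · rintro ⟨m, ha, hv⟩
          have : m = cs.length := by exact_mod_cast ha.symm
          rwa [← this]
        · intro hv; exact ⟨cs.length, rfl, hv⟩
      cases hmark : pvMark ((cs.length : ℕ) : Int) succs seen nxt with
      | inl u =>
        cases u
        refine ⟨?_, ?_⟩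
        · simp only [true_iff]
          exact ⟨ii, List.mem_cons_self, hnin.mp (hma.mp hmark)⟩
        · intro seen2 nxt2 h
          exact absurd h (by simp)
      | inr p =>
        obtain ⟨seen', nxt'⟩ := p
        obtain ⟨hm1, hm2, hm3, hm4⟩ := hmb seen' nxt' hmark
        have hnoend : ¬ pvValid cs ii cs.length := by
          intro hv
          rw [← hnin, ← hma] at hv
          rw [hmark] at hv
          exact absurd hv (by simp)
        obtain ⟨iha, ihb⟩ := ih seen' nxt' hm1 hm2 hel'
        -- seen'[m] = false ↔ seen[m] = false ∧ ¬ pvValid cs ii m, for m < n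
        have hseen'f : ∀ m : ℕ, m < cs.length →
            (seen'.getD m false = false ↔ seen.getD m false = false ∧ ¬ pvValid cs ii m) := by
          intro m hm
          have := hm3 m hm
          rw [hsmem] at this
          constructor
          · intro hf
            have hnot : ¬ (seen.getD m false = true ∨ ∃ m' : ℕ, ((m : ℕ) : Int) = (m' : Int) ∧ pvValid cs ii m') := by
              intro hcontra
              rw [← this] at hcontra
              rw [hf] at hcontra
              exact Bool.false_ne_true hcontra
            push_neg at hnot
            refine ⟨by cases h : seen.getD m false; rfl; exact absurd h hnot.1, ?_⟩
            intro hv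
            exact (hnot.2 m rfl) hv
          · rintro ⟨hf, hv⟩
            cases h : seen'.getD m false
            · rfl
            · rw [this] at h
              rcases h with h | ⟨m', he, hv'⟩
              · rw [hf] at h; exact absurd h (by simp)
              · have : m' = m := by exact_mod_cast he.symm
                exact absurd (by rwa [this] at hv') hv
        refine ⟨?_, ?_⟩
        · rw [iha]
          constructor
          · rintro ⟨i, h1, h2⟩; exact ⟨i, List.mem_cons_of_mem _ h1, h2⟩
          · rintro ⟨i, h1, h2⟩
            rcases (hhead i (fun i => pvValid cs i cs.length)).mp ⟨h1, h2⟩ with ⟨he, hv⟩ | ⟨h1', h2'⟩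
            · exact absurd (by rwa [he] at h2) hnoend
            · exact ⟨i, h1', h2'⟩
        · intro seen2 nxt2 h
          obtain ⟨h1, h2, h3, h4⟩ := ihb seen2 nxt2 h
          refine ⟨h1, h2, ?_, ?_⟩
          · intro m hm
            rw [h3 m hm, hm3 m hm, hsmem]
            constructor
            · rintro ((h | ⟨m', he, hv⟩) | ⟨i, ha, hb⟩)
              · exact Or.inl h
              · have : m' = m := by exact_mod_cast he.symm
                subst this
                exact Or.inr ⟨ii, List.mem_cons_self, hv⟩
              · exact Or.inr ⟨i, List.mem_cons_of_mem _ ha, hb⟩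
            · rintro (h | ⟨i, ha, hb⟩)
              · exact Or.inl (Or.inl h)
              · rcases (hhead i (fun i => pvValid cs i m)).mp ⟨ha, hb⟩ with ⟨he, hv⟩ | ⟨ha', hb'⟩
                · exact Or.inl (Or.inr ⟨m, rfl, by rwa [he] at hv⟩)
                · exact Or.inr ⟨i, ha', hb'⟩
          · intro y
            rw [h4 y]
            constructor
            · rintro (h | ⟨m, ha, hb, hc, i, hd', he⟩)
              · rw [hm4 y] at h
                rcases h with h | ⟨m, ha, hb, hc, hd'⟩
                · exact Or.inl h
                · obtain ⟨m', he', hv⟩ := (hsmem _).mp hd'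
                  have : m' = m := by exact_mod_cast he'.symm
                  subst this
                  exact Or.inr ⟨m', ha, hb, hc, ii, List.mem_cons_self, hv⟩
              · obtain ⟨hc1, hc2⟩ := (hseen'f m hb).mp hc
                exact Or.inr ⟨m, ha, hb, hc1, i, List.mem_cons_of_mem _ hd', he⟩
            · rintro (h | ⟨m, ha, hb, hc, i, hd', he⟩)
              · exact Or.inl (by rw [hm4 y]; exact Or.inl h)
              · rcases (hhead i (fun i => pvValid cs i m)).mp ⟨hd', he⟩ with ⟨hf, hv⟩ | ⟨hd'', he'⟩
                · refine Or.inl ?_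
                  rw [hm4 y]
                  refine Or.inr ⟨m, ha, hb, hc, ?_⟩
                  rw [hsmem]
                  exact ⟨m, rfl, by rwa [hf] at hv⟩
                · by_cases hvii : pvValid cs ii m
                  · refine Or.inl ?_
                    rw [hm4 y]
                    refine Or.inr ⟨m, ha, hb, hc, ?_⟩
                    rw [hsmem]
                    exact ⟨m, rfl, hvii⟩
                  · exact Or.inr ⟨m, ha, hb, (hseen'f m hb).mpr ⟨hc, hvii⟩, i, hd'', he'⟩

theorem pvBFS_spec (cs : List Char) (hd : pvDig cs) :
    ∀ (fuel k : ℕ) (frontier : List Int) (seen : List Bool),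
      k + fuel = cs.length + 1 → pvInvBFS cs frontier seen k →
      (∃ D : ℕ, pvBFS cs (cs.length : Int) fuel frontier seen (k : Int) = (D : Int) ∧
        pvIsMin cs 0 cs.length D) ∨
      (pvBFS cs (cs.length : Int) fuel frontier seen (k : Int) = -1 ∧
        ∀ K, ¬ pvChain cs K 0 cs.length) := by
  intro fuel
  induction fuel with
  | zero =>
    intro k frontier seen hfk hInv
    obtain ⟨hso, hfr1, hfr2, hnoc⟩ := hInv
    refine Or.inr ⟨rfl, ?_⟩
    intro K hchain
    have := pvChain_le hchain
    exact hnoc K (by omega) hchain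
  | succ fuel ih =>
    intro k frontier seen hfk hInv
    obtain ⟨⟨hlen, hsn, hschar⟩, hfr1, hfr2, hnoc⟩ := hInv
    rw [pvBFS]
    by_cases hemp : frontier = []
    · rw [if_pos hemp]
      refine Or.inr ⟨rfl, ?_⟩
      intro K hchain
      obtain ⟨D, hDmin⟩ := pvExists_min K hchain
      by_cases hDk : D ≤ k
      · exact hnoc D hDk hDmin.1
      · obtain ⟨m, hcm, hmn⟩ := pvChain_split hDmin.1 k (by omega)
        have hmlt : m < cs.length := by
          have h1 := pvChain_le hmn
          have h2 : 0 < D - k := by omega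
          omega
        have hmin : pvIsMin cs 0 m k := by
          refine ⟨hcm, ?_⟩
          intro k'' hk'' hc''
          have := pvChain_append hc'' hmn
          exact hDmin.2 (k'' + (D - k)) (by omega) this
        have := hfr2 m hmlt hmin
        rw [hemp] at this
        exact List.not_mem_nil this
    · rw [if_neg hemp]
      have helF : ∀ x ∈ frontier, ∃ i : ℕ, x = (i : Int) ∧ i < cs.length := by
        intro x hx
        obtain ⟨m, h1, h2, _⟩ := hfr1 x hx
        exact ⟨m, h1, h2⟩
      obtain ⟨hla, hlb⟩ := pvLevel_spec cs hd frontier seen [] hlen hsn helF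
      have hminF : ∀ i : ℕ, (i : Int) ∈ frontier → pvIsMin cs 0 i k := by
        intro i hi
        obtain ⟨m, h1, _, h3⟩ := hfr1 _ hi
        have : i = m := by exact_mod_cast h1
        rwa [this]
      cases hlevel : pvLevel cs ((cs.length : ℕ) : Int) frontier seen [] with
      | inl u =>
        cases u
        obtain ⟨i, hiF, hival⟩ := hla.mp hlevel
        refine Or.inl ⟨k + 1, by push_cast; ring_nf, ?_, ?_⟩
        · exact pvChain_snoc_iff.mpr ⟨i, (hminF i hiF).1, hival⟩
        · intro k' hk' hc'
          exact hnoc k' (by omega) hc'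
      | inr p =>
        obtain ⟨seen2, nxt⟩ := p
        obtain ⟨h1, h2, h3, h4⟩ := hlb seen2 nxt hlevel
        have hnoend : ¬ ∃ i : ℕ, (i : Int) ∈ frontier ∧ pvValid cs i cs.length := by
          intro hc
          rw [← hla, hlevel] at hc
          exact absurd hc (by simp)
        have hnoc' : ∀ k' ≤ k + 1, ¬ pvChain cs k' 0 cs.length := by
          intro k' hk' hc'
          by_cases hk'k : k' ≤ k
          · exact hnoc k' hk'k hc'
          · have hk'e : k' = k + 1 := by omega
            subst hk'e
            obtain ⟨i, hci, hvi⟩ := pvChain_snoc_iff.mp hc'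
            have hmin : pvIsMin cs 0 i k := by
              refine ⟨hci, ?_⟩
              intro k'' hk'' hc''
              exact hnoc (k'' + 1) (by omega) (pvChain_snoc_iff.mpr ⟨i, hc'', hvi⟩)
            exact hnoend ⟨i, hfr2 i hvi.1 hmin, hvi⟩
        have hInv' : pvInvBFS cs nxt seen2 (k + 1) := by
          refine ⟨⟨h1, h2, ?_⟩, ?_, ?_, hnoc'⟩
          · intro m hm
            rw [h3 m hm]
            constructor
            · rintro (h | ⟨i, hiF, hvi⟩)
              · obtain ⟨k', hk', hc'⟩ := (hschar m hm).mp h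
                exact ⟨k', by omega, hc'⟩
              · exact ⟨k + 1, le_refl _, pvChain_snoc_iff.mpr ⟨i, (hminF i hiF).1, hvi⟩⟩
            · rintro ⟨k', hk', hc'⟩
              by_cases hsm : ∃ k'' ≤ k, pvChain cs k'' 0 m
              · exact Or.inl ((hschar m hm).mpr hsm)
              · push_neg at hsm
                have hk'e : k' = k + 1 := by
                  rcases Nat.lt_or_ge k' (k + 1) with h | h
                  · exact absurd hc' (hsm k' (by omega))
                  · omega
                subst hk'e
                obtain ⟨i, hci, hvi⟩ := pvChain_snoc_iff.mp hc'
                have hmin : pvIsMin cs 0 i k := by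
                  refine ⟨hci, ?_⟩
                  intro k'' hk'' hc''
                  exact hsm (k'' + 1) (by omega) (pvChain_snoc_iff.mpr ⟨i, hc'', hvi⟩)
                exact Or.inr ⟨i, hfr2 i (by have := hvi.1; have := hvi.2.1; omega) hmin, hvi⟩
          · intro y hy
            rw [h4 y] at hy
            rcases hy with hy | ⟨m, ha, hb, hc, i, hiF, hvi⟩
            · exact absurd hy (List.not_mem_nil)
            · refine ⟨m, ha, hb, ?_, ?_⟩
              · exact pvChain_snoc_iff.mpr ⟨i, (hminF i hiF).1, hvi⟩
              · intro k' hk' hc'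
                have : seen.getD m false = true := (hschar m hb).mpr ⟨k', by omega, hc'⟩
                rw [hc] at this
                exact Bool.false_ne_true this
          · intro m hm hmin
            rw [h4]
            refine Or.inr ⟨m, rfl, hm, ?_, ?_⟩
            · cases h : seen.getD m false
              · rfl
              · obtain ⟨k', hk', hc'⟩ := (hschar m hm).mp h
                exact absurd hc' (hmin.2 k' (by omega))
            · obtain ⟨i, hci, hvi⟩ := pvChain_snoc_iff.mp hmin.1
              have hmini : pvIsMin cs 0 i k := by
                refine ⟨hci, ?_⟩
                intro k'' hk'' hc''
                exact hmin.2 (k'' + 1) (by omega) (pvChain_snoc_iff.mpr ⟨i, hc'', hvi⟩)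
              exact ⟨i, hfr2 i (by have := hvi.1; omega) hmini, hvi⟩
        have := ih (k + 1) nxt seen2 (by omega) hInv'
        have hcast : ((k : ℕ) : Int) + 1 = (((k + 1 : ℕ)) : Int) := by push_cast; ring
        rw [hcast]
        exact this

theorem pvDig_of_all (cs : List Char) (hall : ∀ c ∈ cs, c.isDigit) : pvDig cs := by
  intro k hk
  have hmem : cs.getD k ' ' ∈ cs := by
    rw [List.getD, List.getElem?_eq_getElem hk]
    exact List.getElem_mem hk
  have hdig := hall _ hmem
  unfold pvD digitVal
  have h48 : 48 ≤ (cs.getD k ' ').toNat := by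
    have := (Bool.and_eq_true _ _ |>.mp hdig).1
    simp only [Char.le_def, decide_eq_true_eq] at this
    exact this
  omega

theorem pvInvA_init (cs : List Char) :
    pvInvA cs ((List.replicate (cs.length + 1) ((cs.length : Int) + 1)).set cs.length 0) cs.length := by
  refine ⟨by simp, ?_, ?_⟩
  · intro m hm1 hm2
    have hm : m = cs.length := by omega
    subst hm
    refine Or.inr ⟨0, ?_, pvChain.nil cs.length, fun k' hk' => absurd hk' (by omega)⟩
    rw [pvGetD_set_self (by simp)]
    norm_num
  · intro m hm
    rw [pvGetD_set_ne (by omega), List.getD, List.getElem?_replicate, if_pos (by omega)]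
    rfl

theorem pvInvBFS_init (cs : List Char) (h1 : 1 ≤ cs.length) :
    pvInvBFS cs [0] ((List.replicate (cs.length + 1) false).set 0 true) 0 := by
  refine ⟨⟨by simp, ?_, ?_⟩, ?_, ?_, ?_⟩
  · rw [pvGetD_set_ne (by omega), List.getD, List.getElem?_replicate, if_pos (by omega)]
    rfl
  · intro m hm
    by_cases hm0 : m = 0
    · subst hm0
      rw [pvGetD_set_self (by simp)]
      simp only [true_iff]
      exact ⟨0, le_refl _, pvChain.nil 0⟩
    · rw [pvGetD_set_ne (fun h => hm0 h.symm), List.getD, List.getElem?_replicate, if_pos (by omega)]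
      simp only [Option.getD_some]
      constructor
      · intro h; exact absurd h (by simp)
      · rintro ⟨k', hk', hc'⟩
        interval_cases k'
        exact absurd (pvChain_zero hc').symm hm0
  · intro x hx
    rw [List.mem_singleton] at hx
    subst hx
    exact ⟨0, by norm_num, by omega, pvChain.nil 0, fun k' hk' => absurd hk' (by omega)⟩
  · intro m hm hmin
    have := pvChain_zero hmin.1
    subst this
    simp
  · intro k' hk' hc
    interval_cases k'
    have := pvChain_zero hc
    omega

theorem pvFinal (cs : List Char) (dp : List Int) (r : Int)
    (hA0 : pvCharA cs dp 0)
    (hB : (∃ D : ℕ, r = (D : Int) ∧ pvIsMin cs 0 cs.length D) ∨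
      (r = -1 ∧ ∀ K, ¬ pvChain cs K 0 cs.length)) :
    (if dp.getD 0 0 > (cs.length : Int) then (-1 : Int) else dp.getD 0 0) = r := by
  rcases hA0 with ⟨hval, hnoch⟩ | ⟨k, hval, hmin⟩ <;>
    rcases hB with ⟨D, hr, hminB⟩ | ⟨hr, hnochB⟩
  · exact absurd hminB.1 (hnoch D)
  · rw [if_pos (by rw [hval]; omega), hr]
  · have hkk : k = D := pvIsMin_unique hmin hminB
    subst hkk
    have hkle : 0 + k ≤ cs.length := pvChain_le hmin.1
    rw [if_neg (by rw [hval]; push_cast; omega), hval, hr]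
  · exact absurd hmin.1 (hnochB k)

-- ===== VERDICT (by name: the statement is the Claim_ definition above) =====
theorem cuts_spec : Claim_equal_cuts := by
  unfold Claim_equal_cuts Spec_cuts
  intro s _ hpre
  obtain ⟨hne, hcase⟩ := hpre
  obtain ⟨c0, rest, hcons⟩ := List.exists_cons_of_ne_nil hne
  have hs0 : PySem.Str.pyGet? s 0 = some c0 := by
    simp [PySem.Str.pyGet?, hcons]
  by_cases h0 : c0 = '0'
  · subst h0
    unfold cuts cuts_alt
    rw [hs0]
    rfl
  · have hall : ∀ c ∈ s.toList, c.isDigit := by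
      rcases hcase with hh | hall
      · exfalso
        rw [hcons] at hh
        simp only [List.head?_cons, Option.some.injEq] at hh
        exact h0 hh
      · intro c hc
        exact List.all_eq_true.mp hall c hc
    have hd := pvDig_of_all _ hall
    have hlen1 : 1 ≤ s.toList.length := by rw [hcons]; simp
    unfold cuts cuts_alt
    rw [hs0]
    simp only [Option.getD_some, if_neg h0]
    have htn : ((s.toList.length : Int)).toNat = s.toList.length := Int.toNat_natCast _
    rw [htn]
    have hdp0 : PySem.List.pySetD (List.replicate (s.toList.length + 1) ((s.toList.length : Int) + 1)) (s.toList.length : Int) 0 =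
        (List.replicate (s.toList.length + 1) ((s.toList.length : Int) + 1)).set s.toList.length 0 := by
      rw [PySem.List.pySetD_natCast]
    have hseen0 : PySem.List.pySetD (List.replicate (s.toList.length + 1) false) 0 true =
        (List.replicate (s.toList.length + 1) false).set 0 true := by
      norm_num [PySem.List.pySetD_of_nonneg]
    rw [hdp0, hseen0]
    have hInvA := pvFoldA s.toList hd s.toList.length ((s.toList.length : Int) - 1) _
      (by omega) (by omega) (pvInvA_init s.toList)
    obtain ⟨hlenA, hchA, _⟩ := hInvA
    have hA0 := hchA 0 (by omega) (by omega)
    have hB := pvBFS_spec s.toList hd (s.toList.length + 1) 0 [0] _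
      (by omega) (pvInvBFS_init s.toList hlen1)
    rw [PySem.List.pyGetD_zero]
    exact pvFinal s.toList _ _ hA0 (by exact_mod_cast hB)
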